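-- pv_equiv track=rewrite | github.com/juanigarrido1108/ProgramacionParcial1 | Funciones.py | es_nombre_valido
-- ===== SOURCE A (Python) =====
-- def es_nombre_valido(nombre: str) -> bool:
--     """
--     Se encarga de validar que el nombre ingresado del participante no contenga menos de 3 caracteres, y que lo ingresado sean unicamente letras mayusculas, minusculas y espacios.
--     Esta funcion se utiliza dentro de la funcion cargar_nombres_participantes_valido2().
--
--     Args:
--         nombre: str: Nombre proporcionado en la funcion cargar_nombres_participantes_valido2()
--     Returns:
--         bool: True si cumple con las validaciones.
--               False si no cumple con las validaciones.
--     """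
--
--     if len(nombre) < 3:  # Si no quiero que sean menos de 3 caracteres.
--         return False
--
--     # Verifica cada carácter y compara si son o no mayusculas, minusculas y espacios.
--     else:
--         for i in range(len(nombre)):
--             caracter = nombre[i]
--             codigo = ord(caracter)
--
--             # Verificar si es letra (A-Z, a-z) o espacio (32)
--             es_letra_mayuscula = 65 <= codigo <= 90
--             es_letra_minuscula = 97 <= codigo <= 122
--             es_espacio = codigo == 32
--             if not (es_letra_mayuscula or es_letra_minuscula or es_espacio):
--                 return False
--
--     return True
-- ===== SOURCE B (Python) =====
-- import re
--
-- _NAME_RE = re.compile(r'[A-Za-z ]{3,}')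
--
-- def es_nombre_valido(nombre: str) -> bool:
--     return bool(_NAME_RE.fullmatch(nombre))
-- ===== Notes on version B (the rewrite author's own statement) =====
-- stated objective: idiomatic
-- what changed: Replaces the explicit index loop with ord comparisons by a single precompiled regex fullmatch r'[A-Za-z ]{3,}', which enforces both the minimum length and the ASCII letter/space character class.
import Mathlib
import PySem

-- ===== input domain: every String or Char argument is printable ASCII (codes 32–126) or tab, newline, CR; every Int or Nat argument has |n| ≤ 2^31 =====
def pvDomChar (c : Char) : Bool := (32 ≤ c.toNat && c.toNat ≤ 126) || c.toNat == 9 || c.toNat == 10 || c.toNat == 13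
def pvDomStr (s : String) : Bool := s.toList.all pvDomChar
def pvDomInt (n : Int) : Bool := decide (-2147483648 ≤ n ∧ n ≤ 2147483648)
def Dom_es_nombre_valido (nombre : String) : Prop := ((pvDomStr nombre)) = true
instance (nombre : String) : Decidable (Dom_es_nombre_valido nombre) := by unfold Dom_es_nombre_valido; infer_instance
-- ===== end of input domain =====

-- B replaces A's index loop with ord comparisons by a regex fullmatch r'[A-Za-z ]{3,}'.
-- ===== PORT A =====
-- the body of A's for-loop with its early 'return False', as structural recursion
def esNombreLoop : List Char → Bool
  | [] => true
  | caracter :: rest =>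
    let codigo := caracter.toNat
    let es_letra_mayuscula := 65 ≤ codigo && codigo ≤ 90
    let es_letra_minuscula := 97 ≤ codigo && codigo ≤ 122
    let es_espacio := codigo == 32
    if !(es_letra_mayuscula || es_letra_minuscula || es_espacio) then false
    else esNombreLoop rest

def es_nombre_valido (nombre : String) : Bool :=
  if nombre.toList.length < 3 then false
  else esNombreLoop nombre.toList

-- ===== PORT B =====
-- contract of re.fullmatch(r'[A-Za-z ]{3,}', nombre): every char in the class, at least 3 of them
def es_nombre_valido_alt (nombre : String) : Bool :=
  3 ≤ nombre.toList.length &&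
    nombre.toList.all (fun c => ('A' ≤ c && c ≤ 'Z') || ('a' ≤ c && c ≤ 'z') || c == ' ')

-- ===== PRECONDITION & SPEC =====
def Spec_es_nombre_valido (nombre : String) (out : Bool) : Prop := out = es_nombre_valido_alt nombre
instance (nombre : String) (out : Bool) : Decidable (Spec_es_nombre_valido nombre out) := by unfold Spec_es_nombre_valido; infer_instance

-- ===== CLAIM (what is proved, stated in full; the proofs are below) =====
def Claim_equal_es_nombre_valido : Prop := ∀ (nombre : String), Dom_es_nombre_valido nombre → Spec_es_nombre_valido nombre (es_nombre_valido nombre)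

-- ===== LEMMAS AND PROOFS =====

-- ===== VERDICT (by name: the statement is the Claim_ definition above) =====
lemma char_class_eq (c : Char) :
    (('A' ≤ c && c ≤ 'Z') || ('a' ≤ c && c ≤ 'z') || c == ' ')
      = ((65 ≤ c.toNat && c.toNat ≤ 90) || (97 ≤ c.toNat && c.toNat ≤ 122) || c.toNat == 32) := by
  have hA : 'A'.val.toNat = 65 := rfl
  have hZ : 'Z'.val.toNat = 90 := rfl
  have ha : 'a'.val.toNat = 97 := rfl
  have hz : 'z'.val.toNat = 122 := rfl
  have hsp : (c == ' ') = (c.val.toNat == 32) := by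
    rw [Bool.eq_iff_iff]
    simp only [beq_iff_eq, Char.ext_iff, ← UInt32.toNat_inj]
    exact Iff.rfl
  simp only [Char.le_def, Char.toNat, UInt32.le_iff_toNat_le, hsp, hA, hZ, ha, hz]
  ac_rfl

lemma loop_eq_all (cs : List Char) :
    esNombreLoop cs = cs.all (fun c => ('A' ≤ c && c ≤ 'Z') || ('a' ≤ c && c ≤ 'z') || c == ' ') := by
  induction cs with
  | nil => rfl
  | cons c rest ih =>
    simp only [esNombreLoop, List.all_cons, ih, char_class_eq]
    cases h : ((65 ≤ c.toNat && c.toNat ≤ 90) || (97 ≤ c.toNat && c.toNat ≤ 122) || c.toNat == 32) <;> simp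

theorem es_nombre_valido_spec : Claim_equal_es_nombre_valido := by
  intro nombre _
  unfold Spec_es_nombre_valido es_nombre_valido es_nombre_valido_alt
  rw [loop_eq_all]
  by_cases h : nombre.toList.length < 3
  · rw [if_pos h]
    have h3 : decide (3 ≤ nombre.toList.length) = false := by
      rw [decide_eq_false_iff_not]; omega
    rw [h3, Bool.false_and]
  · rw [if_neg h]
    have h3 : decide (3 ≤ nombre.toList.length) = true := by
      rw [decide_eq_true_eq]; omega
    rw [h3, Bool.true_and]
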